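-- pv_equiv track=rewrite | github.com/AussieSeaweed/index-librorum-prohibitorum | dmoj/ecna05d/main.py | solve
-- ===== SOURCE A (Python) =====
-- def solve(R, C, queens, knights, pawns):
--     blocks = set(queens + knights + pawns)
--     marks = blocks.copy()
--
--     def mark(r, c):
--         if 0 < r <= R and 0 < c <= C and (r, c) not in blocks:
--             marks.add((r, c))
--             return True
--
--         return False
--
--     for r, c in queens:
--         for k in range(1, max(R, C)):
--             if not mark(r + k, c):
--                 break
--         for k in range(1, max(R, C)):
--             if not mark(r - k, c):
--                 break
--         for k in range(1, max(R, C)):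
--             if not mark(r, c + k):
--                 break
--         for k in range(1, max(R, C)):
--             if not mark(r, c - k):
--                 break
--         for k in range(1, max(R, C)):
--             if not mark(r + k, c + k):
--                 break
--         for k in range(1, max(R, C)):
--             if not mark(r - k, c + k):
--                 break
--         for k in range(1, max(R, C)):
--             if not mark(r + k, c - k):
--                 break
--         for k in range(1, max(R, C)):
--             if not mark(r - k, c - k):
--                 break
--
--     for r, c in knights:
--         mark(r + 1, c + 2)
--         mark(r - 1, c + 2)
--         mark(r + 1, c - 2)
--         mark(r - 1, c - 2)
--         mark(r + 2, c + 1)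
--         mark(r - 2, c + 1)
--         mark(r + 2, c - 1)
--         mark(r - 2, c - 1)
--
--     return R * C - len(marks)
-- ===== SOURCE B (Python) =====
-- def solve(R, C, queens, knights, pawns):
--     blocks = set(queens + knights + pawns)
--     K = max(R, C)
--
--     def span(x, dx, lim):
--         # how many consecutive steps t = 1, 2, ... keep 1 <= x + t*dx <= lim
--         # (None = this axis never leaves the band)
--         if dx == 0:
--             return None if 1 <= x <= lim else 0
--         if dx == 1:
--             return max(lim - x, 0) if x >= 0 else 0
--         return max(x - 1, 0) if x <= lim + 1 else 0
--
--     def nearest(qr, qc, dr, dc):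
--         # distance of the nearest blocker strictly ahead on the ray, None if none
--         nb = None
--         for br, bc in blocks:
--             t = (br - qr) * dr if dr != 0 else (bc - qc) * dc
--             if t >= 1 and qr + t * dr == br and qc + t * dc == bc:
--                 if nb is None or t < nb:
--                     nb = t
--         return nb
--
--     att = set()
--     for qr, qc in queens:
--         for dr, dc in ((1, 0), (-1, 0), (0, 1), (0, -1), (1, 1), (-1, 1), (1, -1), (-1, -1)):
--             stop = K - 1
--             er = span(qr, dr, R)
--             if er is not None:
--                 stop = min(stop, er)
--             ec = span(qc, dc, C)
--             if ec is not None: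
--                 stop = min(stop, ec)
--             nb = nearest(qr, qc, dr, dc)
--             if nb is not None:
--                 stop = min(stop, nb - 1)
--             if stop < 0:
--                 stop = 0
--             for t in range(1, stop + 1):
--                 att.add((qr + t * dr, qc + t * dc))
--     for nr, nc in knights:
--         for dr, dc in ((1, 2), (1, -2), (-1, 2), (-1, -2), (2, 1), (2, -1), (-2, 1), (-2, -1)):
--             tr, tc = nr + dr, nc + dc
--             if 0 < tr <= R and 0 < tc <= C and (tr, tc) not in blocks:
--                 att.add((tr, tc))
--     return R * C - len(blocks) - len(att)
-- ===== Notes on version B (the rewrite author's own statement) =====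
-- stated objective: alternative
-- what changed: A walks each queen ray cell by cell, testing board bounds and blocker membership and breaking at the first failure while mutating one marks set; B instead computes each ray's extent in closed form (distance to the board edge, distance to the nearest aligned blocker found by scanning the blocker set, and A's max(R,C)-1 cap), bulk-adds the whole segment to a separate attacked-squares set, and returns R*C - |blockers| - |attacked|.
import Mathlib
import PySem

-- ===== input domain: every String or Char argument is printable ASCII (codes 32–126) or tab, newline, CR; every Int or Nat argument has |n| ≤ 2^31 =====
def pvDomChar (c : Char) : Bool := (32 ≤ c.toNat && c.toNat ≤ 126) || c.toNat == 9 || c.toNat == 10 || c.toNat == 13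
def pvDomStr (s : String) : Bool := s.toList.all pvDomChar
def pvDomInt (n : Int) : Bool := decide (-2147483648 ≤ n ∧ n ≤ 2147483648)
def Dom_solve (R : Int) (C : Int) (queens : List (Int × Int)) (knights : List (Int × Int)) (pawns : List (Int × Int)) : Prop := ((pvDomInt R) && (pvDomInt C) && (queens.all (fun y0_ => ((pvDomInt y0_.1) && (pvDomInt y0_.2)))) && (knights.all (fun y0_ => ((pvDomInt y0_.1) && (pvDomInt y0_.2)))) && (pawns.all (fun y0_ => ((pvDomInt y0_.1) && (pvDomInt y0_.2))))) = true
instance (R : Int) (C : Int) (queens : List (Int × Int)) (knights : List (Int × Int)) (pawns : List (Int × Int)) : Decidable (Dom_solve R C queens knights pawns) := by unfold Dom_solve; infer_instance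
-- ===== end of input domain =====

-- B replaces A's walk-and-test ray marking (step, test membership, break) by a closed-form ray
-- extent per queen and direction (edge span, nearest aligned blocker, A's cap) and bulk segment
-- adds into a separate attacked-set; alternative decomposition, not claimed faster.

-- ===== PORT A =====
-- the 8 queen ray directions, in the order of A's eight loops
def aQueenDirs : List (Int × Int) := [(1, 0), (-1, 0), (0, 1), (0, -1), (1, 1), (-1, 1), (1, -1), (-1, -1)]
-- the 8 knight targets, in the order of A's eight mark calls
def aKnightDirs : List (Int × Int) := [(1, 2), (-1, 2), (1, -2), (-1, -2), (2, 1), (-2, 1), (2, -1), (-2, -1)]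

-- A's local function mark: add (r, c) if on-board and not a blocker; also report success
def aMark (R C : Int) (blocks : List (Int × Int)) (m : PySem.Set (Int × Int)) (r c : Int) :
    PySem.Set (Int × Int) × Bool :=
  if 0 < r ∧ r ≤ R ∧ 0 < c ∧ c ≤ C ∧ (r, c) ∉ blocks then (PySem.Set.add m (r, c), true)
  else (m, false)

-- one 'for k in range(1, max(R, C)): if not mark(...): break' loop; fuel = number of range steps left
def aRay (R C : Int) (blocks : List (Int × Int)) (r c dr dc : Int)
    (m : PySem.Set (Int × Int)) : Nat → PySem.Set (Int × Int)
  | 0 => m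
  | fuel + 1 =>
    let res := aMark R C blocks m (r + dr) (c + dc)
    if res.2 then aRay R C blocks (r + dr) (c + dc) dr dc res.1 fuel else res.1

def solve (R : Int) (C : Int) (queens : List (Int × Int)) (knights : List (Int × Int)) (pawns : List (Int × Int)) : Int :=
  let blocks : PySem.Set (Int × Int) := PySem.Set.ofList (queens ++ knights ++ pawns)
  let marks := queens.foldl
    (fun m q => aQueenDirs.foldl
      (fun m d => aRay R C blocks q.1 q.2 d.1 d.2 m (max R C - 1).toNat) m) blocks
  let marks2 := knights.foldl
    (fun m n => aKnightDirs.foldl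
      (fun m d => (aMark R C blocks m (n.1 + d.1) (n.2 + d.2)).1) m) marks
  R * C - (marks2.length : Int)

-- ===== PORT B =====
-- knight targets and queen ray directions in the order B's loops try them
def bKnightDirs : List (Int × Int) := [(1, 2), (1, -2), (-1, 2), (-1, -2), (2, 1), (2, -1), (-2, 1), (-2, -1)]
def bQueenDirs : List (Int × Int) := [(1, 0), (-1, 0), (0, 1), (0, -1), (1, 1), (-1, 1), (1, -1), (-1, -1)]

-- how many consecutive steps t = 1, 2, ... keep 1 <= x + t*dx <= lim (none = never leaves the band)
def bSpan (x dx lim : Int) : Option Int :=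
  if dx = 0 then (if 1 ≤ x ∧ x ≤ lim then none else some 0)
  else if dx = 1 then (if 0 ≤ x then some (max (lim - x) 0) else some 0)
  else (if x ≤ lim + 1 then some (max (x - 1) 0) else some 0)

-- distance of the nearest blocker strictly ahead on the ray, none if there is none
def bNearest (qr qc dr dc : Int) (blocks : List (Int × Int)) : Option Int :=
  blocks.foldl (fun nb b =>
    let t := if dr ≠ 0 then (b.1 - qr) * dr else (b.2 - qc) * dc
    if 1 ≤ t ∧ qr + t * dr = b.1 ∧ qc + t * dc = b.2 then
      match nb with
      | none => some t
      | some u => if t < u then some t else some u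
    else nb) none

-- closed-form ray extent: board edge, nearest blocker, and A's cap of max(R,C)-1 steps
def bStop (R C : Int) (blocks : List (Int × Int)) (qr qc dr dc : Int) : Int :=
  let s0 := max R C - 1
  let s1 := match bSpan qr dr R with | none => s0 | some e => min s0 e
  let s2 := match bSpan qc dc C with | none => s1 | some e => min s1 e
  let s3 := match bNearest qr qc dr dc blocks with | none => s2 | some u => min s2 (u - 1)
  if s3 < 0 then 0 else s3

def solve_alt (R : Int) (C : Int) (queens : List (Int × Int)) (knights : List (Int × Int)) (pawns : List (Int × Int)) : Int :=
  let blocks : PySem.Set (Int × Int) := PySem.Set.ofList (queens ++ knights ++ pawns)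
  let att1 := queens.foldl (fun a q =>
    bQueenDirs.foldl (fun a d =>
      (PySem.List.pyRange 1 (bStop R C blocks q.1 q.2 d.1 d.2 + 1) 1).foldl
        (fun a t => PySem.Set.add a (q.1 + t * d.1, q.2 + t * d.2)) a) a) PySem.Set.empty
  let att2 := knights.foldl (fun a n =>
    bKnightDirs.foldl (fun a d =>
      if 0 < n.1 + d.1 ∧ n.1 + d.1 ≤ R ∧ 0 < n.2 + d.2 ∧ n.2 + d.2 ≤ C ∧
          (n.1 + d.1, n.2 + d.2) ∉ blocks then
        PySem.Set.add a (n.1 + d.1, n.2 + d.2)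
      else a) a) att1
  R * C - (blocks.length : Int) - (att2.length : Int)

-- ===== PRECONDITION & SPEC =====
def Spec_solve (R : Int) (C : Int) (queens : List (Int × Int)) (knights : List (Int × Int)) (pawns : List (Int × Int)) (out : Int) : Prop := out = solve_alt R C queens knights pawns
instance (R : Int) (C : Int) (queens : List (Int × Int)) (knights : List (Int × Int)) (pawns : List (Int × Int)) (out : Int) : Decidable (Spec_solve R C queens knights pawns out) := by unfold Spec_solve; infer_instance

-- ===== CLAIM (what is proved, stated in full; the proofs are below) =====
def Claim_equal_solve : Prop := ∀ (R : Int) (C : Int) (queens : List (Int × Int)) (knights : List (Int × Int)) (pawns : List (Int × Int)), Dom_solve R C queens knights pawns → Spec_solve R C queens knights pawns (solve R C queens knights pawns)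

-- ===== LEMMAS AND PROOFS =====

-- a cell is free: on the board and not a blocker
def Free (R C : Int) (blocks : List (Int × Int)) (p : Int × Int) : Prop :=
  0 < p.1 ∧ p.1 ≤ R ∧ 0 < p.2 ∧ p.2 ≤ C ∧ p ∉ blocks

-- square s is attacked by some queen: reachable in k ≤ max(R,C)-1 steps through free cells
def QAtt (R C : Int) (blocks queens : List (Int × Int)) (s : Int × Int) : Prop :=
  ∃ q ∈ queens, ∃ d ∈ aQueenDirs, ∃ k : Nat, 1 ≤ k ∧ k ≤ (max R C - 1).toNat ∧
    s = (q.1 + k * d.1, q.2 + k * d.2) ∧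
    ∀ j : Nat, 1 ≤ j → j ≤ k → Free R C blocks (q.1 + j * d.1, q.2 + j * d.2)

-- square s is attacked by some knight (s itself must be free, since A only marks free cells)
def KAtt (R C : Int) (blocks knights : List (Int × Int)) (s : Int × Int) : Prop :=
  ∃ n ∈ knights, ∃ d ∈ aKnightDirs,
    Free R C blocks (n.1 + d.1, n.2 + d.2) ∧ s = (n.1 + d.1, n.2 + d.2)

-- A's marks set, named for the proofs
def aMarksAll (R C : Int) (queens knights pawns : List (Int × Int)) : PySem.Set (Int × Int) :=
  let blocks : PySem.Set (Int × Int) := PySem.Set.ofList (queens ++ knights ++ pawns)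
  let marks := queens.foldl
    (fun m q => aQueenDirs.foldl
      (fun m d => aRay R C blocks q.1 q.2 d.1 d.2 m (max R C - 1).toNat) m) blocks
  knights.foldl
    (fun m n => aKnightDirs.foldl
      (fun m d => (aMark R C blocks m (n.1 + d.1) (n.2 + d.2)).1) m) marks

theorem solve_eq_marks (R C : Int) (queens knights pawns : List (Int × Int)) :
    solve R C queens knights pawns = R * C - ((aMarksAll R C queens knights pawns).length : Int) := rfl

theorem aMark_pos (R C : Int) (blocks : List (Int × Int)) (m : PySem.Set (Int × Int)) (r c : Int)
    (h : Free R C blocks (r, c)) :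
    aMark R C blocks m r c = (PySem.Set.add m (r, c), true) := by
  unfold Free at h; unfold aMark; rw [if_pos h]

theorem aMark_neg (R C : Int) (blocks : List (Int × Int)) (m : PySem.Set (Int × Int)) (r c : Int)
    (h : ¬ Free R C blocks (r, c)) :
    aMark R C blocks m r c = (m, false) := by
  unfold Free at h; unfold aMark; rw [if_neg h]

theorem pairEq (a b a' b' : Int) (h1 : a = a') (h2 : b = b') :
    ((a, b) : Int × Int) = (a', b') := by rw [h1, h2]

theorem mem_aRay (R C : Int) (blocks : List (Int × Int)) (dr dc : Int) :
    ∀ (fuel : Nat) (r c : Int) (m : PySem.Set (Int × Int)) (s : Int × Int),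
      s ∈ aRay R C blocks r c dr dc m fuel ↔
        s ∈ m ∨ ∃ k : Nat, 1 ≤ k ∧ k ≤ fuel ∧ s = (r + k * dr, c + k * dc) ∧
          ∀ j : Nat, 1 ≤ j → j ≤ k → Free R C blocks (r + j * dr, c + j * dc) := by
  intro fuel
  induction fuel with
  | zero =>
    intro r c m s
    constructor
    · intro h; exact Or.inl (by simpa [aRay] using h)
    · rintro (hm | ⟨k, hk1, hk0, _⟩)
      · simpa [aRay] using hm
      · omega
  | succ fuel ih =>
    intro r c m s
    simp only [aRay]
    by_cases h : Free R C blocks (r + dr, c + dc)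
    · rw [aMark_pos _ _ _ _ _ _ h]
      simp only [if_true]
      rw [ih, PySem.Set.mem_add]
      constructor
      · rintro ((hm | hs) | ⟨k, hk1, hkf, hs, hall⟩)
        · exact Or.inl hm
        · refine Or.inr ⟨1, le_refl 1, by omega, ?_, ?_⟩
          · rw [hs]; exact pairEq _ _ _ _ (by push_cast; ring) (by push_cast; ring)
          · intro j hj1 hj2
            have hj : j = 1 := by omega
            subst hj
            have heq : ((r + (1 : Nat) * dr, c + (1 : Nat) * dc) : Int × Int) = (r + dr, c + dc) :=
              pairEq _ _ _ _ (by push_cast; ring) (by push_cast; ring)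
            rw [heq]; exact h
        · refine Or.inr ⟨k + 1, by omega, by omega, ?_, ?_⟩
          · rw [hs]; exact pairEq _ _ _ _ (by push_cast; ring) (by push_cast; ring)
          · intro j hj1 hj2
            by_cases hj : j = 1
            · subst hj
              have heq : ((r + (1 : Nat) * dr, c + (1 : Nat) * dc) : Int × Int) = (r + dr, c + dc) :=
                pairEq _ _ _ _ (by push_cast; ring) (by push_cast; ring)
              rw [heq]; exact h
            · have h1j : 1 ≤ j - 1 := by omega
              have := hall (j - 1) h1j (by omega)
              have heq : ((r + dr + ((j - 1 : Nat) : Int) * dr, c + dc + ((j - 1 : Nat) : Int) * dc) : Int × Int)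
                  = (r + (j : Nat) * dr, c + (j : Nat) * dc) := by
                have hc1 : ((j - 1 : Nat) : Int) = (j : Int) - 1 := by omega
                exact pairEq _ _ _ _ (by rw [hc1]; ring) (by rw [hc1]; ring)
              rw [← heq]; exact this
      · rintro (hm | ⟨k, hk1, hkf, hs, hall⟩)
        · exact Or.inl (Or.inl hm)
        · by_cases hk : k = 1
          · subst hk
            refine Or.inl (Or.inr ?_)
            rw [hs]; exact pairEq _ _ _ _ (by push_cast; ring) (by push_cast; ring)
          · refine Or.inr ⟨k - 1, by omega, by omega, ?_, ?_⟩
            · rw [hs]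
              have hc1 : ((k - 1 : Nat) : Int) = (k : Int) - 1 := by omega
              exact pairEq _ _ _ _ (by rw [hc1]; ring) (by rw [hc1]; ring)
            · intro j hj1 hj2
              have := hall (j + 1) (by omega) (by omega)
              have heq : ((r + dr + (j : Nat) * dr, c + dc + (j : Nat) * dc) : Int × Int)
                  = (r + ((j + 1 : Nat) : Int) * dr, c + ((j + 1 : Nat) : Int) * dc) :=
                pairEq _ _ _ _ (by push_cast; ring) (by push_cast; ring)
              rw [heq]; exact this
    · rw [aMark_neg _ _ _ _ _ _ h]
      simp only [if_false, Bool.false_eq_true]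
      constructor
      · intro hm; exact Or.inl hm
      · rintro (hm | ⟨k, hk1, hkf, hs, hall⟩)
        · exact hm
        · exfalso
          have := hall 1 (le_refl 1) hk1
          have heq : ((r + (1 : Nat) * dr, c + (1 : Nat) * dc) : Int × Int) = (r + dr, c + dc) :=
            pairEq _ _ _ _ (by push_cast; ring) (by push_cast; ring)
          rw [heq] at this
          exact h this

theorem nodup_aRay (R C : Int) (blocks : List (Int × Int)) (dr dc : Int) :
    ∀ (fuel : Nat) (r c : Int) (m : PySem.Set (Int × Int)), m.Nodup →
      (aRay R C blocks r c dr dc m fuel).Nodup := by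
  intro fuel
  induction fuel with
  | zero => intro r c m hm; simpa [aRay] using hm
  | succ fuel ih =>
    intro r c m hm
    simp only [aRay]
    by_cases h : Free R C blocks (r + dr, c + dc)
    · rw [aMark_pos _ _ _ _ _ _ h]
      simpa using ih _ _ _ (PySem.Set.nodup_add m _ hm)
    · rw [aMark_neg _ _ _ _ _ _ h]
      simpa using hm

theorem mem_foldl_set {α : Type} (f : PySem.Set (Int × Int) → α → PySem.Set (Int × Int))
    (P : α → (Int × Int) → Prop)
    (hf : ∀ m x s, s ∈ f m x ↔ s ∈ m ∨ P x s) :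
    ∀ (l : List α) (m : PySem.Set (Int × Int)) (s : Int × Int),
      s ∈ l.foldl f m ↔ s ∈ m ∨ ∃ x ∈ l, P x s := by
  intro l
  induction l with
  | nil => simp
  | cons x xs ih =>
    intro m s
    rw [List.foldl_cons, ih]
    rw [hf m x s]
    simp only [List.mem_cons]
    constructor
    · rintro ((hm | hp) | ⟨y, hy, hp⟩)
      · exact Or.inl hm
      · exact Or.inr ⟨x, Or.inl rfl, hp⟩
      · exact Or.inr ⟨y, Or.inr hy, hp⟩
    · rintro (hm | ⟨y, (rfl | hy), hp⟩)
      · exact Or.inl (Or.inl hm)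
      · exact Or.inl (Or.inr hp)
      · exact Or.inr ⟨y, hy, hp⟩

theorem nodup_foldl_set {α : Type} (f : PySem.Set (Int × Int) → α → PySem.Set (Int × Int))
    (hf : ∀ m x, m.Nodup → (f m x).Nodup) :
    ∀ (l : List α) (m : PySem.Set (Int × Int)), m.Nodup → (l.foldl f m).Nodup := by
  intro l
  induction l with
  | nil => intro m hm; simpa using hm
  | cons x xs ih =>
    intro m hm
    rw [List.foldl_cons]
    exact ih _ (hf m x hm)

theorem mem_aMark1 (R C : Int) (blocks : List (Int × Int)) (m : PySem.Set (Int × Int)) (r c : Int)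
    (s : Int × Int) :
    s ∈ (aMark R C blocks m r c).1 ↔ s ∈ m ∨ (Free R C blocks (r, c) ∧ s = (r, c)) := by
  by_cases h : Free R C blocks (r, c)
  · rw [aMark_pos _ _ _ _ _ _ h, PySem.Set.mem_add]
    tauto
  · rw [aMark_neg _ _ _ _ _ _ h]
    tauto

theorem nodup_aMark1 (R C : Int) (blocks : List (Int × Int)) (m : PySem.Set (Int × Int)) (r c : Int)
    (hm : m.Nodup) : (aMark R C blocks m r c).1.Nodup := by
  by_cases h : Free R C blocks (r, c)
  · rw [aMark_pos _ _ _ _ _ _ h]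
    exact PySem.Set.nodup_add m _ hm
  · rw [aMark_neg _ _ _ _ _ _ h]
    exact hm

theorem mem_aMarksAll (R C : Int) (queens knights pawns : List (Int × Int)) (s : Int × Int) :
    s ∈ aMarksAll R C queens knights pawns ↔
      s ∈ queens ++ knights ++ pawns ∨
      QAtt R C (PySem.Set.ofList (queens ++ knights ++ pawns)) queens s ∨
      KAtt R C (PySem.Set.ofList (queens ++ knights ++ pawns)) knights s := by
  simp only [aMarksAll]
  rw [mem_foldl_set _
    (fun n s => ∃ d ∈ aKnightDirs,
      Free R C (PySem.Set.ofList (queens ++ knights ++ pawns)) (n.1 + d.1, n.2 + d.2) ∧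
        s = (n.1 + d.1, n.2 + d.2))
    (fun m n s => by
      rw [mem_foldl_set _
        (fun d s => Free R C (PySem.Set.ofList (queens ++ knights ++ pawns)) (n.1 + d.1, n.2 + d.2) ∧
          s = (n.1 + d.1, n.2 + d.2))
        (fun m d s => mem_aMark1 _ _ _ _ _ _ _)])]
  rw [mem_foldl_set _
    (fun q s => ∃ d ∈ aQueenDirs, ∃ k : Nat, 1 ≤ k ∧ k ≤ (max R C - 1).toNat ∧
      s = (q.1 + k * d.1, q.2 + k * d.2) ∧
      ∀ j : Nat, 1 ≤ j → j ≤ k →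
        Free R C (PySem.Set.ofList (queens ++ knights ++ pawns)) (q.1 + j * d.1, q.2 + j * d.2))
    (fun m q s => by
      rw [mem_foldl_set _
        (fun d s => ∃ k : Nat, 1 ≤ k ∧ k ≤ (max R C - 1).toNat ∧
          s = (q.1 + k * d.1, q.2 + k * d.2) ∧
          ∀ j : Nat, 1 ≤ j → j ≤ k →
            Free R C (PySem.Set.ofList (queens ++ knights ++ pawns)) (q.1 + j * d.1, q.2 + j * d.2))
        (fun m d s => mem_aRay _ _ _ _ _ _ _ _ _ _)])]
  rw [PySem.Set.mem_ofList]
  unfold QAtt KAtt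
  rw [or_assoc]

theorem nodup_aMarksAll (R C : Int) (queens knights pawns : List (Int × Int)) :
    (aMarksAll R C queens knights pawns).Nodup := by
  simp only [aMarksAll]
  apply nodup_foldl_set _ (fun m n hm => nodup_foldl_set _ (fun m d hm => nodup_aMark1 _ _ _ _ _ _ hm) _ _ hm)
  apply nodup_foldl_set _ (fun m q hm => nodup_foldl_set _ (fun m d hm => nodup_aRay _ _ _ _ _ _ _ _ _ hm) _ _ hm)
  exact PySem.Set.nodup_ofList _

theorem QAtt_free (R C : Int) (blocks queens : List (Int × Int)) (x : Int × Int)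
    (h : QAtt R C blocks queens x) : Free R C blocks x := by
  obtain ⟨q, -, d, -, k, hk1, -, hs, hall⟩ := h
  rw [hs]
  exact hall k hk1 (le_refl k)

theorem KAtt_free (R C : Int) (blocks knights : List (Int × Int)) (x : Int × Int)
    (h : KAtt R C blocks knights x) : Free R C blocks x := by
  obtain ⟨n, -, d, -, hf, hs⟩ := h
  rw [hs]
  exact hf

-- B's att set, named for the proofs
def bAttAll (R C : Int) (queens knights pawns : List (Int × Int)) : PySem.Set (Int × Int) :=
  let blocks : PySem.Set (Int × Int) := PySem.Set.ofList (queens ++ knights ++ pawns)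
  let att1 := queens.foldl (fun a q =>
    bQueenDirs.foldl (fun a d =>
      (PySem.List.pyRange 1 (bStop R C blocks q.1 q.2 d.1 d.2 + 1) 1).foldl
        (fun a t => PySem.Set.add a (q.1 + t * d.1, q.2 + t * d.2)) a) a) PySem.Set.empty
  knights.foldl (fun a n =>
    bKnightDirs.foldl (fun a d =>
      if 0 < n.1 + d.1 ∧ n.1 + d.1 ≤ R ∧ 0 < n.2 + d.2 ∧ n.2 + d.2 ≤ C ∧
          (n.1 + d.1, n.2 + d.2) ∉ blocks then
        PySem.Set.add a (n.1 + d.1, n.2 + d.2)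
      else a) a) att1

theorem solve_alt_eq (R C : Int) (queens knights pawns : List (Int × Int)) :
    solve_alt R C queens knights pawns =
      R * C - ((PySem.Set.ofList (queens ++ knights ++ pawns)).length : Int) -
        ((bAttAll R C queens knights pawns).length : Int) := rfl

-- a span bound caps t exactly when every step 1..t stays inside the band
theorem bSpan_iff (x dx lim : Int) (hdx : dx = 1 ∨ dx = -1 ∨ dx = 0) (t : Int) (ht : 1 ≤ t) :
    (match bSpan x dx lim with | none => True | some e => t ≤ e) ↔
      (∀ j : Int, 1 ≤ j → j ≤ t → 1 ≤ x + j * dx ∧ x + j * dx ≤ lim) := by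
  rcases hdx with h | h | h <;> subst h
  · by_cases hx : 0 ≤ x
    · have hs : bSpan x 1 lim = some (max (lim - x) 0) := by simp [bSpan, hx]
      rw [hs]
      show t ≤ max (lim - x) 0 ↔ _
      constructor
      · intro hb j hj1 hj2; constructor <;> omega
      · intro hb
        have hbt := hb t (by omega) (by omega)
        omega
    · have hs : bSpan x 1 lim = some 0 := by simp [bSpan, hx]
      rw [hs]
      show t ≤ 0 ↔ _
      constructor
      · intro hb; omega
      · intro hb
        have hb1 := hb 1 (by omega) (by omega)
        omega
  · by_cases hx : x ≤ lim + 1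
    · have hs : bSpan x (-1) lim = some (max (x - 1) 0) := by simp [bSpan, hx]
      rw [hs]
      show t ≤ max (x - 1) 0 ↔ _
      constructor
      · intro hb j hj1 hj2; constructor <;> omega
      · intro hb
        have hbt := hb t (by omega) (by omega)
        obtain ⟨hbt1, hbt2⟩ := hbt
        omega
    · have hs : bSpan x (-1) lim = some 0 := by simp [bSpan, hx]
      rw [hs]
      show t ≤ 0 ↔ _
      constructor
      · intro hb; omega
      · intro hb
        have hb1 := hb 1 (by omega) (by omega)
        obtain ⟨hb11, hb12⟩ := hb1
        omega
  · by_cases hx : 1 ≤ x ∧ x ≤ lim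
    · have hs : bSpan x 0 lim = none := by simp [bSpan, hx]
      rw [hs]
      show True ↔ _
      constructor
      · intro _ j _ _
        constructor <;> omega
      · intro _; trivial
    · have hs : bSpan x 0 lim = some 0 := by simp [bSpan, hx]
      rw [hs]
      show t ≤ 0 ↔ _
      constructor
      · intro hb; omega
      · intro hb
        have hb1 := hb 1 (by omega) (by omega)
        obtain ⟨hb11, hb12⟩ := hb1
        omega

-- the aligned-distance and min-fold step of bNearest, named for the proofs
def tofb (qr qc dr dc : Int) (b : Int × Int) : Int :=
  if dr ≠ 0 then (b.1 - qr) * dr else (b.2 - qc) * dc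

def nStep (qr qc dr dc : Int) (acc : Option Int) (b : Int × Int) : Option Int :=
  let t := if dr ≠ 0 then (b.1 - qr) * dr else (b.2 - qc) * dc
  if 1 ≤ t ∧ qr + t * dr = b.1 ∧ qc + t * dc = b.2 then
    match acc with
    | none => some t
    | some u => if t < u then some t else some u
  else acc

theorem bNearest_eq (qr qc dr dc : Int) (blocks : List (Int × Int)) :
    bNearest qr qc dr dc blocks = blocks.foldl (nStep qr qc dr dc) none := rfl

theorem nStep_pos (qr qc dr dc : Int) (nb : Option Int) (b : Int × Int)
    (h : 1 ≤ tofb qr qc dr dc b ∧ qr + tofb qr qc dr dc b * dr = b.1 ∧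
      qc + tofb qr qc dr dc b * dc = b.2) :
    nStep qr qc dr dc nb b =
      (match nb with
       | none => some (tofb qr qc dr dc b)
       | some u => if tofb qr qc dr dc b < u then some (tofb qr qc dr dc b) else some u) := by
  unfold tofb at h
  unfold nStep
  rw [if_pos h]
  rfl

theorem nStep_neg (qr qc dr dc : Int) (nb : Option Int) (b : Int × Int)
    (h : ¬ (1 ≤ tofb qr qc dr dc b ∧ qr + tofb qr qc dr dc b * dr = b.1 ∧
      qc + tofb qr qc dr dc b * dc = b.2)) :
    nStep qr qc dr dc nb b = nb := by
  unfold tofb at h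
  unfold nStep
  rw [if_neg h]

theorem nStep_cell (qr qc dr dc : Int) (b : Int × Int)
    (h : 1 ≤ tofb qr qc dr dc b ∧ qr + tofb qr qc dr dc b * dr = b.1 ∧
      qc + tofb qr qc dr dc b * dc = b.2) :
    b = (qr + tofb qr qc dr dc b * dr, qc + tofb qr qc dr dc b * dc) := by
  obtain ⟨-, h1, h2⟩ := h
  rw [h1, h2]

theorem bNearest_some (qr qc dr dc : Int) :
    ∀ (l : List (Int × Int)) (acc : Option Int) (u : Int),
      l.foldl (nStep qr qc dr dc) acc = some u →
      acc = some u ∨ (1 ≤ u ∧ (qr + u * dr, qc + u * dc) ∈ l) := by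
  intro l
  induction l with
  | nil => intro acc u h; exact Or.inl h
  | cons b l ih =>
    intro acc u h
    rw [List.foldl_cons] at h
    rcases ih _ u h with hstep | ⟨hu1, humem⟩
    · by_cases hcond : (1 ≤ tofb qr qc dr dc b ∧ qr + tofb qr qc dr dc b * dr = b.1 ∧
          qc + tofb qr qc dr dc b * dc = b.2)
      · rw [nStep_pos qr qc dr dc acc b hcond] at hstep
        cases acc with
        | none =>
          rw [Option.some.injEq] at hstep
          refine Or.inr ⟨by have := hcond.1; omega, ?_⟩
          rw [← hstep, ← nStep_cell qr qc dr dc b hcond]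
          exact List.mem_cons_self
        | some v =>
          dsimp only at hstep
          split_ifs at hstep with hlt <;> rw [Option.some.injEq] at hstep
          · refine Or.inr ⟨by have := hcond.1; omega, ?_⟩
            rw [← hstep, ← nStep_cell qr qc dr dc b hcond]
            exact List.mem_cons_self
          · exact Or.inl (by rw [hstep])
      · rw [nStep_neg qr qc dr dc acc b hcond] at hstep
        exact Or.inl hstep
    · exact Or.inr ⟨hu1, List.mem_cons_of_mem b humem⟩

theorem bNearest_acc_le (qr qc dr dc : Int) :
    ∀ (l : List (Int × Int)) (v : Int),
      ∃ u, l.foldl (nStep qr qc dr dc) (some v) = some u ∧ u ≤ v := by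
  intro l
  induction l with
  | nil => intro v; exact ⟨v, rfl, le_refl v⟩
  | cons b l ih =>
    intro v
    rw [List.foldl_cons]
    by_cases hcond : (1 ≤ tofb qr qc dr dc b ∧ qr + tofb qr qc dr dc b * dr = b.1 ∧
        qc + tofb qr qc dr dc b * dc = b.2)
    · rw [nStep_pos qr qc dr dc (some v) b hcond]
      dsimp only
      split_ifs with hlt
      · obtain ⟨u, hu, hle⟩ := ih (tofb qr qc dr dc b)
        exact ⟨u, hu, by omega⟩
      · exact ih v
    · rw [nStep_neg qr qc dr dc (some v) b hcond]
      exact ih v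

theorem bNearest_le (qr qc dr dc : Int) (hd : dr * dr = 1 ∨ (dr = 0 ∧ dc * dc = 1)) :
    ∀ (l : List (Int × Int)) (acc : Option Int) (j : Int), 1 ≤ j →
      (qr + j * dr, qc + j * dc) ∈ l →
      ∃ u, l.foldl (nStep qr qc dr dc) acc = some u ∧ u ≤ j := by
  intro l
  induction l with
  | nil => intro acc j _ hmem; exact absurd hmem (List.not_mem_nil)
  | cons b l ih =>
    intro acc j hj1 hmem
    rw [List.foldl_cons]
    rcases List.mem_cons.1 hmem with hb | hb
    · subst hb
      have htj : tofb qr qc dr dc (qr + j * dr, qc + j * dc) = j := by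
        unfold tofb
        dsimp only
        rcases hd with h | ⟨h0, h1⟩
        · have hne : dr ≠ 0 := by intro h'; rw [h'] at h; omega
          simp only [hne, ne_eq, not_false_eq_true, if_true]
          nlinarith [h]
        · subst h0
          norm_num
          nlinarith [h1]
      have hcond : (1 ≤ tofb qr qc dr dc (qr + j * dr, qc + j * dc) ∧
          qr + tofb qr qc dr dc (qr + j * dr, qc + j * dc) * dr = (qr + j * dr, qc + j * dc).1 ∧
          qc + tofb qr qc dr dc (qr + j * dr, qc + j * dc) * dc = (qr + j * dr, qc + j * dc).2) := by
        rw [htj]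
        exact ⟨hj1, rfl, rfl⟩
      rw [nStep_pos qr qc dr dc acc _ hcond]
      cases acc with
      | none =>
        obtain ⟨u, hu, hle⟩ :=
          bNearest_acc_le qr qc dr dc l (tofb qr qc dr dc (qr + j * dr, qc + j * dc))
        rw [htj] at hle
        exact ⟨u, hu, hle⟩
      | some v =>
        rw [htj]
        dsimp only
        split_ifs with hlt
        · exact bNearest_acc_le qr qc dr dc l j
        · obtain ⟨u, hu, hle⟩ := bNearest_acc_le qr qc dr dc l v
          exact ⟨u, hu, by omega⟩
    · exact ih _ j hj1 hb


-- directions give squared components: every queen direction satisfies the recovery condition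
theorem aQueenDirs_sq (d : Int × Int) (hd : d ∈ aQueenDirs) :
    d.1 * d.1 = 1 ∨ (d.1 = 0 ∧ d.2 * d.2 = 1) := by
  fin_cases hd <;> decide

theorem aQueenDirs_shape (d : Int × Int) (hd : d ∈ aQueenDirs) :
    (d.1 = 1 ∨ d.1 = -1 ∨ d.1 = 0) ∧ (d.2 = 1 ∨ d.2 = -1 ∨ d.2 = 0) := by
  fin_cases hd <;> decide

theorem bNearest_none_noblock (qr qc dr dc : Int) (blocks : List (Int × Int))
    (hsq : dr * dr = 1 ∨ (dr = 0 ∧ dc * dc = 1))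
    (hns : bNearest qr qc dr dc blocks = none) :
    ∀ j : Int, 1 ≤ j → (qr + j * dr, qc + j * dc) ∉ blocks := by
  intro j hj hmem
  obtain ⟨u', hu', -⟩ := bNearest_le qr qc dr dc hsq blocks none j hj hmem
  rw [← bNearest_eq, hns] at hu'
  simp at hu'

theorem bNearest_some_facts (qr qc dr dc : Int) (blocks : List (Int × Int)) (u : Int)
    (hsq : dr * dr = 1 ∨ (dr = 0 ∧ dc * dc = 1))
    (hns : bNearest qr qc dr dc blocks = some u) :
    1 ≤ u ∧ (qr + u * dr, qc + u * dc) ∈ blocks ∧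
      ∀ j : Int, 1 ≤ j → (qr + j * dr, qc + j * dc) ∈ blocks → u ≤ j := by
  have hmain : 1 ≤ u ∧ (qr + u * dr, qc + u * dc) ∈ blocks := by
    rcases bNearest_some qr qc dr dc blocks none u (by rw [← bNearest_eq]; exact hns) with h | h
    · simp at h
    · exact h
  refine ⟨hmain.1, hmain.2, ?_⟩
  intro j hj hmem
  obtain ⟨u', hu', hle⟩ := bNearest_le qr qc dr dc hsq blocks none j hj hmem
  rw [← bNearest_eq, hns] at hu'
  rw [Option.some.injEq] at hu'
  omega

-- the closed-form extent caps k exactly when A's walk would still be marking at step k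
theorem stop_iff (R C : Int) (blocks : List (Int × Int)) (qr qc : Int) (d : Int × Int)
    (hd : d ∈ aQueenDirs) (k : Nat) (hk : 1 ≤ k) :
    ((k : Int) ≤ bStop R C blocks qr qc d.1 d.2) ↔
      (k ≤ (max R C - 1).toNat ∧
        ∀ j : Nat, 1 ≤ j → j ≤ k → Free R C blocks (qr + j * d.1, qc + j * d.2)) := by
  have hk' : (1 : Int) ≤ (k : Int) := by exact_mod_cast hk
  have hsh := aQueenDirs_shape d hd
  have hsq := aQueenDirs_sq d hd
  have hrow := bSpan_iff qr d.1 R hsh.1 (k : Int) hk'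
  have hcol := bSpan_iff qc d.2 C hsh.2 (k : Int) hk'
  have hcap : (k ≤ (max R C - 1).toNat) ↔ ((k : Int) ≤ max R C - 1) := by omega
  have hbr : (∀ j : Nat, 1 ≤ j → j ≤ k → Free R C blocks (qr + j * d.1, qc + j * d.2)) ↔
      ((∀ j : Int, 1 ≤ j → j ≤ (k : Int) → 1 ≤ qr + j * d.1 ∧ qr + j * d.1 ≤ R) ∧
       (∀ j : Int, 1 ≤ j → j ≤ (k : Int) → 1 ≤ qc + j * d.2 ∧ qc + j * d.2 ≤ C) ∧
       (∀ j : Int, 1 ≤ j → j ≤ (k : Int) → (qr + j * d.1, qc + j * d.2) ∉ blocks)) := by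
    constructor
    · intro H
      have key : ∀ j : Int, 1 ≤ j → j ≤ (k : Int) →
          Free R C blocks (qr + j * d.1, qc + j * d.2) := by
        intro j hj1 hj2
        have hc : ((j.toNat : Nat) : Int) = j := by omega
        have := H j.toNat (by omega) (by omega)
        rw [hc] at this
        exact this
      exact ⟨fun j h1 h2 => ⟨by have := (key j h1 h2).1; omega, (key j h1 h2).2.1⟩,
        fun j h1 h2 => ⟨by have := (key j h1 h2).2.2.1; omega, (key j h1 h2).2.2.2.1⟩,
        fun j h1 h2 => (key j h1 h2).2.2.2.2⟩
    · rintro ⟨H1, H2, H3⟩ j hj1 hj2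
      have c1 : (1 : Int) ≤ (j : Int) := by exact_mod_cast hj1
      have c2 : ((j : Nat) : Int) ≤ (k : Int) := by exact_mod_cast hj2
      have h1 := H1 (j : Int) c1 c2
      have h2 := H2 (j : Int) c1 c2
      exact ⟨by omega, by omega, by omega, by omega, H3 (j : Int) c1 c2⟩
  rw [hcap, hbr]
  simp only [bStop]
  have hfin : ∀ s3 : Int, ((k : Int) ≤ if s3 < 0 then 0 else s3) ↔ (k : Int) ≤ s3 := by
    intro s3; split_ifs <;> omega
  rcases hrs : bSpan qr d.1 R with _ | e1 <;> rcases hcs : bSpan qc d.2 C with _ | e2 <;>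
    rcases hns : bNearest qr qc d.1 d.2 blocks with _ | u <;>
    rw [hrs] at hrow <;> rw [hcs] at hcol <;> dsimp only at hrow hcol ⊢ <;>
    rw [hfin] <;> (try simp only [le_min_iff])
  · have hnb := bNearest_none_noblock qr qc d.1 d.2 blocks hsq hns
    constructor
    · intro hle
      exact ⟨hle, hrow.1 trivial, hcol.1 trivial, fun j h1 _ => hnb j h1⟩
    · intro h; exact h.1
  · obtain ⟨hu1, humem, hmin⟩ := bNearest_some_facts qr qc d.1 d.2 blocks u hsq hns
    constructor
    · intro hle
      exact ⟨hle.1, hrow.1 trivial, hcol.1 trivial,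
        fun j h1 h2 hmem => by have h3 := hle.2; have := hmin j h1 hmem; omega⟩
    · rintro ⟨hK, -, -, hn⟩
      have hku : ¬ u ≤ (k : Int) := fun hl => hn u (by omega) (by omega) humem
      exact ⟨hK, by omega⟩
  · have hnb := bNearest_none_noblock qr qc d.1 d.2 blocks hsq hns
    constructor
    · intro hle
      exact ⟨hle.1, hrow.1 trivial, hcol.1 hle.2, fun j h1 _ => hnb j h1⟩
    · rintro ⟨hK, -, hc, -⟩
      exact ⟨hK, hcol.2 hc⟩
  · obtain ⟨hu1, humem, hmin⟩ := bNearest_some_facts qr qc d.1 d.2 blocks u hsq hns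
    constructor
    · intro hle
      exact ⟨hle.1.1, hrow.1 trivial, hcol.1 hle.1.2,
        fun j h1 h2 hmem => by have h3 := hle.2; have := hmin j h1 hmem; omega⟩
    · rintro ⟨hK, -, hc, hn⟩
      have hku : ¬ u ≤ (k : Int) := fun hl => hn u (by omega) (by omega) humem
      exact ⟨⟨hK, hcol.2 hc⟩, by omega⟩
  · have hnb := bNearest_none_noblock qr qc d.1 d.2 blocks hsq hns
    constructor
    · intro hle
      exact ⟨hle.1, hrow.1 hle.2, hcol.1 trivial, fun j h1 _ => hnb j h1⟩
    · rintro ⟨hK, hr, -, -⟩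
      exact ⟨hK, hrow.2 hr⟩
  · obtain ⟨hu1, humem, hmin⟩ := bNearest_some_facts qr qc d.1 d.2 blocks u hsq hns
    constructor
    · intro hle
      exact ⟨hle.1.1, hrow.1 hle.1.2, hcol.1 trivial,
        fun j h1 h2 hmem => by have h3 := hle.2; have := hmin j h1 hmem; omega⟩
    · rintro ⟨hK, hr, -, hn⟩
      have hku : ¬ u ≤ (k : Int) := fun hl => hn u (by omega) (by omega) humem
      exact ⟨⟨hK, hrow.2 hr⟩, by omega⟩
  · have hnb := bNearest_none_noblock qr qc d.1 d.2 blocks hsq hns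
    constructor
    · intro hle
      exact ⟨hle.1.1, hrow.1 hle.1.2, hcol.1 hle.2, fun j h1 _ => hnb j h1⟩
    · rintro ⟨hK, hr, hc, -⟩
      exact ⟨⟨hK, hrow.2 hr⟩, hcol.2 hc⟩
  · obtain ⟨hu1, humem, hmin⟩ := bNearest_some_facts qr qc d.1 d.2 blocks u hsq hns
    constructor
    · intro hle
      exact ⟨hle.1.1.1, hrow.1 hle.1.1.2, hcol.1 hle.1.2,
        fun j h1 h2 hmem => by have h3 := hle.2; have := hmin j h1 hmem; omega⟩
    · rintro ⟨hK, hr, hc, hn⟩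
      have hku : ¬ u ≤ (k : Int) := fun hl => hn u (by omega) (by omega) humem
      exact ⟨⟨⟨hK, hrow.2 hr⟩, hcol.2 hc⟩, by omega⟩

theorem mem_bAttAll (R C : Int) (queens knights pawns : List (Int × Int)) (s : Int × Int) :
    s ∈ bAttAll R C queens knights pawns ↔
      QAtt R C (PySem.Set.ofList (queens ++ knights ++ pawns)) queens s ∨
      KAtt R C (PySem.Set.ofList (queens ++ knights ++ pawns)) knights s := by
  have hqd : bQueenDirs = aQueenDirs := rfl
  have hkd : ∀ x : Int × Int, x ∈ bKnightDirs ↔ x ∈ aKnightDirs := by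
    intro x; constructor <;> intro h <;> fin_cases h <;> decide
  simp only [bAttAll]
  rw [mem_foldl_set _
    (fun n s => ∃ d ∈ bKnightDirs,
      Free R C (PySem.Set.ofList (queens ++ knights ++ pawns)) (n.1 + d.1, n.2 + d.2) ∧
        s = (n.1 + d.1, n.2 + d.2))
    (fun a n s => by
      rw [mem_foldl_set _
        (fun d s => Free R C (PySem.Set.ofList (queens ++ knights ++ pawns)) (n.1 + d.1, n.2 + d.2) ∧
          s = (n.1 + d.1, n.2 + d.2))
        (fun a d s => by
          by_cases h : Free R C (PySem.Set.ofList (queens ++ knights ++ pawns)) (n.1 + d.1, n.2 + d.2)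
          · rw [if_pos (show (0 < n.1 + d.1 ∧ n.1 + d.1 ≤ R ∧ 0 < n.2 + d.2 ∧ n.2 + d.2 ≤ C ∧
                (n.1 + d.1, n.2 + d.2) ∉ PySem.Set.ofList (queens ++ knights ++ pawns)) from h),
              PySem.Set.mem_add]
            tauto
          · rw [if_neg (show ¬ (0 < n.1 + d.1 ∧ n.1 + d.1 ≤ R ∧ 0 < n.2 + d.2 ∧ n.2 + d.2 ≤ C ∧
                (n.1 + d.1, n.2 + d.2) ∉ PySem.Set.ofList (queens ++ knights ++ pawns)) from h)]
            tauto)])]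
  rw [mem_foldl_set _
    (fun q s => ∃ d ∈ bQueenDirs, ∃ t, (t ∈ PySem.List.pyRange 1
        (bStop R C (PySem.Set.ofList (queens ++ knights ++ pawns)) q.1 q.2 d.1 d.2 + 1) 1) ∧
      s = (q.1 + t * d.1, q.2 + t * d.2))
    (fun a q s => by
      rw [mem_foldl_set _
        (fun d s => ∃ t, (t ∈ PySem.List.pyRange 1
            (bStop R C (PySem.Set.ofList (queens ++ knights ++ pawns)) q.1 q.2 d.1 d.2 + 1) 1) ∧
          s = (q.1 + t * d.1, q.2 + t * d.2))
        (fun a d s => by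
          rw [mem_foldl_set _ (fun t s => s = (q.1 + t * d.1, q.2 + t * d.2))
            (fun a t s => PySem.Set.mem_add a _ s)])])]
  constructor
  · rintro ((hemp | ⟨q, hq, d, hd, t, htmem, hs⟩) | ⟨n, hn, d, hd, hf, hs⟩)
    · exact absurd hemp (by simp [PySem.Set.empty])
    · left
      rw [PySem.List.mem_pyRange_one] at htmem
      obtain ⟨ht1, ht2⟩ := htmem
      have hd' : d ∈ aQueenDirs := hqd ▸ hd
      have hkk : 1 ≤ t.toNat := by omega
      have hcast : ((t.toNat : Nat) : Int) = t := by omega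
      have hst := (stop_iff R C (PySem.Set.ofList (queens ++ knights ++ pawns)) q.1 q.2 d hd'
        t.toNat hkk).1 (by rw [hcast]; omega)
      refine ⟨q, hq, d, hd', t.toNat, hkk, hst.1, ?_, hst.2⟩
      rw [hcast]
      exact hs
    · right
      exact ⟨n, hn, d, (hkd d).1 hd, hf, hs⟩
  · rintro (⟨q, hq, d, hd, k, hk1, hkK, hs, hall⟩ | ⟨n, hn, d, hd, hf, hs⟩)
    · have hstop := (stop_iff R C (PySem.Set.ofList (queens ++ knights ++ pawns)) q.1 q.2 d hd
        k hk1).2 ⟨hkK, hall⟩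
      refine Or.inl (Or.inr ⟨q, hq, d, hqd.symm ▸ hd, (k : Int), ?_, hs⟩)
      rw [PySem.List.mem_pyRange_one]
      constructor
      · exact_mod_cast hk1
      · omega
    · exact Or.inr ⟨n, hn, d, (hkd d).2 hd, hf, hs⟩

theorem nodup_bAttAll (R C : Int) (queens knights pawns : List (Int × Int)) :
    (bAttAll R C queens knights pawns).Nodup := by
  simp only [bAttAll]
  apply nodup_foldl_set _ (fun a n ha => nodup_foldl_set _
    (fun a d ha => by split_ifs with h; exacts [PySem.Set.nodup_add a _ ha, ha]) _ _ ha)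
  apply nodup_foldl_set _ (fun a q ha => nodup_foldl_set _
    (fun a d ha => nodup_foldl_set _ (fun a t ha => PySem.Set.nodup_add a _ ha) _ _ ha) _ _ ha)
  exact List.nodup_nil

theorem marks_perm (R C : Int) (queens knights pawns : List (Int × Int)) :
    List.Perm (aMarksAll R C queens knights pawns)
      (PySem.Set.ofList (queens ++ knights ++ pawns) ++ bAttAll R C queens knights pawns) := by
  rw [List.perm_ext_iff_of_nodup (nodup_aMarksAll R C queens knights pawns) ?_]
  · intro x
    rw [mem_aMarksAll,
      List.mem_append (s := PySem.Set.ofList (queens ++ knights ++ pawns))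
        (t := bAttAll R C queens knights pawns),
      PySem.Set.mem_ofList, mem_bAttAll]
  · rw [List.nodup_append]
    refine ⟨PySem.Set.nodup_ofList _, nodup_bAttAll R C queens knights pawns, ?_⟩
    intro a ha b hbmem hab
    subst hab
    rw [mem_bAttAll] at hbmem
    have hfree : Free R C (PySem.Set.ofList (queens ++ knights ++ pawns)) a := by
      rcases hbmem with h | h
      · exact QAtt_free _ _ _ _ _ h
      · exact KAtt_free _ _ _ _ _ h
    exact hfree.2.2.2.2 ha

-- ===== VERDICT (by name: the statement is the Claim_ definition above) =====
theorem solve_spec : Claim_equal_solve := by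
  intro R C queens knights pawns _
  unfold Spec_solve
  rw [solve_eq_marks, solve_alt_eq]
  have hlen : (aMarksAll R C queens knights pawns).length =
      (PySem.Set.ofList (queens ++ knights ++ pawns)).length +
        (bAttAll R C queens knights pawns).length := by
    rw [(marks_perm R C queens knights pawns).length_eq, List.length_append]
  rw [hlen]
  push_cast
  ring
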